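-- pv_equiv track=rewrite | github.com/IAmProgrammist/formal_languages_and_automata_theory | libs/lab1/task1.py | get_available_grammars_right
-- ===== SOURCE A (Python) =====
-- def get_available_grammars_right(grammar_dict, chain):
--     available_grammars = []
--     max_index = -1
--     for i in range(0, len(grammar_dict)):
--         grammar = grammar_dict[i]
--         if (index := chain.find(grammar[0])) != -1 and index > max_index:
--             available_grammars = [(i, grammar)]
--             max_index = index
--         elif index == max_index:
--             available_grammars.append((i, grammar))
--     return available_grammars
-- ===== SOURCE B (Python) =====
-- def get_available_grammars_right(grammar_dict, chain):
--     indices = [chain.find(g[0]) for g in grammar_dict]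
--     m = max(indices, default=-1)
--     return [(i, p[0]) for i, p in enumerate(zip(grammar_dict, indices)) if p[1] == m]
-- ===== Notes on version B (the rewrite author's own statement) =====
-- stated objective: simpler
-- what changed: Replaces the single-pass running-max with reset/append state machine by a build-table-then-filter decomposition: compute all first-occurrence indices, take their max (default -1), and filter the grammars hitting it.
import Mathlib
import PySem

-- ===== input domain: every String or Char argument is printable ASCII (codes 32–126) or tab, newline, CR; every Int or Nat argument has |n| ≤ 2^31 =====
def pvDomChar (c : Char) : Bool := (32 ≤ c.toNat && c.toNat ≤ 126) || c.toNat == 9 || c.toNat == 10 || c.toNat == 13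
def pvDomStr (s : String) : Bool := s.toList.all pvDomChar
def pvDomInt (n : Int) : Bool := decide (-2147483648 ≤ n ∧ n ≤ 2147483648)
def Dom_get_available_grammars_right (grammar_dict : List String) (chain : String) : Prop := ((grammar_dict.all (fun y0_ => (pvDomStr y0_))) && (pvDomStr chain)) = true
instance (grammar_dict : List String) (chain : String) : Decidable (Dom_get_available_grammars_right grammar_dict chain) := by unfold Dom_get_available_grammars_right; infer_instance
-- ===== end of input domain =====

-- B replaces A's running-max-with-reset state machine by a simpler build-indices / max / filter decomposition.


-- ===== PORT A =====
def get_available_grammars_right (grammar_dict : List String) (chain : String) : List (Int × String) :=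
  ((PySem.List.pyRange 0 (PySem.List.len grammar_dict) 1).foldl
    (fun (st : List (Int × String) × Int) i =>
      let grammar := PySem.List.pyGetD grammar_dict i ""
      match PySem.Str.pyGet? grammar 0 with
      | none => st  -- grammar[0] raises IndexError in Python (empty production); excluded by Pre_
      | some c =>
        let index := PySem.Str.find chain (String.ofList [c])
        if index ≠ -1 ∧ st.2 < index then ([(i, grammar)], index)
        else if index = st.2 then (st.1 ++ [(i, grammar)], st.2)
        else st)
    ([], -1)).1

-- ===== PORT B =====
-- chain.find(g[0]); the -1 arm is unreachable under Pre_ (Python raises on g = "")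
def pvFirstIdx (chain g : String) : Int :=
  match PySem.Str.pyGet? g 0 with
  | some c => PySem.Str.find chain (String.ofList [c])
  | none => -1

def get_available_grammars_right_alt (grammar_dict : List String) (chain : String) : List (Int × String) :=
  let indices := grammar_dict.map (pvFirstIdx chain)
  let m := (PySem.List.max? indices (fun x => x)).getD (-1)
  (PySem.List.enumerate (grammar_dict.zip indices) 0).filterMap
    (fun p => if p.2.2 = m then some (p.1, p.2.1) else none)

-- ===== PRECONDITION & SPEC =====
-- Pre_ excludes an empty production string in grammar_dict, on which Python A raises IndexError at grammar[0].
def Pre_get_available_grammars_right (grammar_dict : List String) (chain : String) : Prop :=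
  ∀ g ∈ grammar_dict, g ≠ ""
instance (grammar_dict : List String) (chain : String) : Decidable (Pre_get_available_grammars_right grammar_dict chain) := by unfold Pre_get_available_grammars_right; infer_instance

def pvWitness_get_available_grammars_right : List String × String := (["ab", "c", "b"], "abc")

def Spec_get_available_grammars_right (grammar_dict : List String) (chain : String) (out : List (Int × String)) : Prop := out = get_available_grammars_right_alt grammar_dict chain
instance (grammar_dict : List String) (chain : String) (out : List (Int × String)) : Decidable (Spec_get_available_grammars_right grammar_dict chain out) := by unfold Spec_get_available_grammars_right; infer_instance

-- ===== CLAIM (what is proved, stated in full; the proofs are below) =====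
def Claim_equal_get_available_grammars_right : Prop := ∀ (grammar_dict : List String) (chain : String), Dom_get_available_grammars_right grammar_dict chain → Pre_get_available_grammars_right grammar_dict chain → Spec_get_available_grammars_right grammar_dict chain (get_available_grammars_right grammar_dict chain)

-- ===== LEMMAS AND PROOFS =====

-- A's loop body, expressed on a ready-made (index, grammar) pair
def pvStepA (chain : String) (st : List (Int × String) × Int) (p : Int × String) :
    List (Int × String) × Int :=
  match PySem.Str.pyGet? p.2 0 with
  | none => st
  | some c =>
    let index := PySem.Str.find chain (String.ofList [c])
    if index ≠ -1 ∧ st.2 < index then ([(p.1, p.2)], index)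
    else if index = st.2 then (st.1 ++ [(p.1, p.2)], st.2)
    else st

lemma portA_eq_foldl_enumerate (gd : List String) (chain : String) :
    get_available_grammars_right gd chain
      = ((PySem.List.enumerate gd 0).foldl (pvStepA chain) ([], -1)).1 := by
  rw [get_available_grammars_right, PySem.List.enumerate_eq_map_pyRange gd "", List.foldl_map]
  rfl

lemma pvFirstIdx_ge (chain g : String) : -1 ≤ pvFirstIdx chain g := by
  unfold pvFirstIdx
  cases PySem.Str.pyGet? g 0 with
  | none => simp
  | some c =>
    simp only [PySem.Str.find]
    exact PySem.Chars.neg_one_le_find _ _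

lemma pvStepA_eq (chain : String) (st : List (Int × String) × Int) (p : Int × String)
    (hne : p.2 ≠ "") (hm : -1 ≤ st.2) :
    pvStepA chain st p =
      (if st.2 < pvFirstIdx chain p.2 then ([(p.1, p.2)], pvFirstIdx chain p.2)
       else if pvFirstIdx chain p.2 = st.2 then (st.1 ++ [(p.1, p.2)], st.2)
       else st) := by
  have h0 : PySem.Str.pyGet? p.2 0 = some (p.2.toList.headI) :=
    by
    have hnil : p.2.toList ≠ [] := by
      intro h
      exact hne (by rwa [String.toList_eq_nil_iff] at h)
    cases hl : p.2.toList with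
    | nil => exact absurd hl hnil
    | cons a t => simp [PySem.Str.pyGet?_natCast (n := 0), hl]
  unfold pvStepA pvFirstIdx
  simp only [h0]
  by_cases hlt : st.2 < PySem.Str.find chain (String.ofList [p.2.toList.headI])
  · rw [if_pos ⟨by omega, hlt⟩, if_pos hlt]
  · rw [if_neg hlt]
    by_cases heq : PySem.Str.find chain (String.ofList [p.2.toList.headI]) = st.2
    · rw [if_neg (by tauto), if_pos heq]
    · rw [if_neg (by tauto), if_neg heq]

-- the running max A maintains
def pvRunMax (chain : String) (gs : List String) (m : Int) : Int :=
  gs.foldl (fun a g => max a (pvFirstIdx chain g)) m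

lemma pvRunMax_le (chain : String) (gs : List String) (m : Int) : m ≤ pvRunMax chain gs m := by
  induction gs generalizing m with
  | nil => simp [pvRunMax]
  | cons g t ih =>
    calc m ≤ max m (pvFirstIdx chain g) := le_max_left _ _
    _ ≤ pvRunMax chain t (max m (pvFirstIdx chain g)) := ih _
    _ = pvRunMax chain (g :: t) m := rfl

-- the loop invariant: starting from (acc, m), the loop ends with the new max M, the list being
-- (acc if M stayed m, else nothing) ++ the later entries whose first-occurrence index is M
lemma loopA_spec (chain : String) (gs : List String) (k : Int)
    (acc : List (Int × String)) (m : Int) (hm : -1 ≤ m)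
    (hne : ∀ g ∈ gs, g ≠ "") :
    (PySem.List.enumerate gs k).foldl (pvStepA chain) (acc, m)
      = ((if pvRunMax chain gs m = m then acc else []) ++
          (PySem.List.enumerate gs k).filterMap
            (fun p => if pvFirstIdx chain p.2 = pvRunMax chain gs m then some p else none),
         pvRunMax chain gs m) := by
  induction gs generalizing k acc m with
  | nil => simp [pvRunMax, PySem.List.enumerate_nil]
  | cons g t ih =>
    have hg : g ≠ "" := hne g (by simp)
    have ht : ∀ x ∈ t, x ≠ "" := fun x hx => hne x (by simp [hx])
    rw [PySem.List.enumerate_cons, List.foldl_cons,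
        pvStepA_eq chain (acc, m) (k, g) hg hm]
    have hM : pvRunMax chain (g :: t) m = pvRunMax chain t (max m (pvFirstIdx chain g)) := rfl
    by_cases hlt : m < pvFirstIdx chain g
    · have hmax : max m (pvFirstIdx chain g) = pvFirstIdx chain g := by omega
      rw [if_pos hlt, ih (k + 1) [(k, g)] (pvFirstIdx chain g)
            (le_trans hm (le_of_lt hlt)) ht, hM, hmax]
      have hMge : pvFirstIdx chain g ≤ pvRunMax chain t (pvFirstIdx chain g) :=
        pvRunMax_le _ _ _
      have hMne : pvRunMax chain t (pvFirstIdx chain g) ≠ m := by omega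
      rw [if_neg hMne]
      simp only [List.filterMap_cons, List.nil_append]
      by_cases he : pvFirstIdx chain g = pvRunMax chain t (pvFirstIdx chain g)
      · rw [if_pos he.symm, if_pos he]
        simp
      · rw [if_neg (fun h => he h.symm), if_neg he]
        simp
    · rw [if_neg hlt]
      have hmax : max m (pvFirstIdx chain g) = m := by
        have := pvFirstIdx_ge chain g; omega
      by_cases heq : pvFirstIdx chain g = m
      · rw [if_pos heq, ih (k + 1) (acc ++ [(k, g)]) m hm ht, hM, hmax]
        simp only [List.filterMap_cons]
        by_cases hMm : pvRunMax chain t m = m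
        · simp [hMm, heq]
        · have : ¬ pvFirstIdx chain g = pvRunMax chain t m := by
            rw [heq]; intro h; exact hMm h.symm
          simp [hMm, this]
      · rw [if_neg heq, ih (k + 1) acc m hm ht, hM, hmax]
        simp only [List.filterMap_cons]
        have hgm : pvFirstIdx chain g ≠ pvRunMax chain t m := by
          have h1 := pvRunMax_le chain t m
          have : pvFirstIdx chain g < m := by
            have := pvFirstIdx_ge chain g; omega
          omega
        simp [hgm]

-- max(xs, default=d) equals the running max when d is below every element
lemma maxGetD_eq_foldl (xs : List Int) (d : Int) (h : ∀ x ∈ xs, d ≤ x) :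
    (PySem.List.max? xs (fun x => x)).getD d = xs.foldl max d := by
  cases xs with
  | nil => simp [PySem.List.max?]
  | cons x t =>
    rw [PySem.List.max?_id_cons]
    simp only [Option.getD_some, List.foldl_cons]
    have hd : max d x = x := by
      have := h x (by simp); omega
    rw [hd]

lemma enumerate_zip_map (chain : String) (gd : List String) (k : Int) :
    PySem.List.enumerate (gd.zip (gd.map (pvFirstIdx chain))) k
      = (PySem.List.enumerate gd k).map (fun p => (p.1, (p.2, pvFirstIdx chain p.2))) := by
  induction gd generalizing k with
  | nil => simp [PySem.List.enumerate_nil]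
  | cons g t ih =>
    simp only [List.map_cons, List.zip_cons_cons, PySem.List.enumerate_cons, ih]

-- ===== VERDICT (by name: the statement is the Claim_ definition above) =====
theorem get_available_grammars_right_spec : Claim_equal_get_available_grammars_right := by
  intro gd chain _ hpre
  unfold Spec_get_available_grammars_right
  rw [portA_eq_foldl_enumerate, loopA_spec chain gd 0 [] (-1) (le_refl _) hpre]
  rw [get_available_grammars_right_alt]
  simp only
  have hmax : (PySem.List.max? (gd.map (pvFirstIdx chain)) (fun x => x)).getD (-1)
      = pvRunMax chain gd (-1) := by
    rw [maxGetD_eq_foldl _ _ (by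
      intro x hx
      obtain ⟨g, _, rfl⟩ := List.mem_map.mp hx
      exact pvFirstIdx_ge chain g)]
    rw [pvRunMax, List.foldl_map]
  rw [hmax, enumerate_zip_map chain gd 0, List.filterMap_map]
  simp only [Function.comp]
  have hfilt : ∀ (l : List (Int × String)),
      l.filterMap (fun p => if pvFirstIdx chain p.2 = pvRunMax chain gd (-1) then some p else none)
        = l.filterMap (fun p =>
            if pvFirstIdx chain p.2 = pvRunMax chain gd (-1) then some (p.1, p.2) else none) := by
    intro l
    apply List.filterMap_congr
    intro p _
    split_ifs <;> rfl
  rw [hfilt]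
  split_ifs with h
  · rfl
  · rfl
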